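-- pv_equiv track=rewrite | github.com/sam98528/CodingTest | 프로그래머스/lv1/131128. 숫자 짝꿍/숫자 짝꿍.py | solution
-- ===== SOURCE A (Python) =====
-- def solution(X, Y):
--     answer = ''
--     count = dict()
--     yCount = dict()
--
--     for i in Y:
--         if int(i) in yCount:
--             yCount[int(i)] += 1
--         else:
--             yCount[int(i)] = 1
--
--     for i in X:
--         if int(i) in yCount and yCount[int(i)] > 0:
--             yCount[int(i)] -= 1
--             if int(i) in count:
--                 count[int(i)] += 1
--             else:
--                 count[int(i)] = 1
--
--     if count:
--         for j in range(9,-1,-1):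
--             if j in count:
--                 temp = count[j]
--                 answer += str(j) * temp
--         if answer[0] == '0':
--             answer = '0'
--     else:
--         answer = "-1"
--
--
--     return answer
-- ===== SOURCE B (Python) =====
-- def solution(X, Y):
--     xs = sorted(map(int, X), reverse=True)
--     ys = sorted(map(int, Y), reverse=True)
--     common = []
--     i = j = 0
--     while i < len(xs) and j < len(ys):
--         if xs[i] == ys[j]:
--             common.append(xs[i])
--             i += 1
--             j += 1
--         elif xs[i] > ys[j]:
--             i += 1
--         else:
--             j += 1
--     if not common:
--         return '-1'
--     if common[0] == 0:
--         return '0'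
--     return ''.join(map(str, common))
-- ===== Notes on version B (the rewrite author's own statement) =====
-- stated objective: alternative
-- what changed: Replaces A's dict-based consume-while-scanning counting (build Y's digit counts, decrement them while walking X, then emit digits 9..0 by stored counts) with a sorting algorithm: sort both digit sequences descending and take their multiset intersection with a two-pointer merge, which is already the answer in order; same '-1' and leading-zero collapse.
import Mathlib
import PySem

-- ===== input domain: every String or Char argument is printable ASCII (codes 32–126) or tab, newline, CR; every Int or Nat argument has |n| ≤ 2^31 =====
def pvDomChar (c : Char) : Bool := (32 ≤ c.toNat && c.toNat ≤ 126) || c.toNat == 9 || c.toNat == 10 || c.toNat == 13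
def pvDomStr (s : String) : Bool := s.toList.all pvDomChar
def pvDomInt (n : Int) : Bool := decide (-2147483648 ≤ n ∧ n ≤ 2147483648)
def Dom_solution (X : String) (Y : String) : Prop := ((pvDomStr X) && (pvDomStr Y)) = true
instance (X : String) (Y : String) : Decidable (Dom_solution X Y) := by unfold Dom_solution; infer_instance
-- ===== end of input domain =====

-- B replaces A's dict-based consume-while-scanning counting by a sorting algorithm:
-- sort both digit sequences descending and two-pointer-merge their multiset intersection (alternative).

-- ===== PORT A =====
-- int(i) for the single character i; the 0 default is only reached outside Pre_, where Python raises ValueError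
def pyDigit (c : Char) : Int := (PySem.Int.ofChars? [c]).getD 0

-- body of A's first loop (over Y)
def aYStep (d : PySem.Dict Int Int) (k : Int) : PySem.Dict Int Int :=
  if d.contains k then d.insert k (d.getD k 0 + 1) else d.insert k 1

-- body of A's second loop (over X); state = (yCount, count)
def aXStep (s : PySem.Dict Int Int × PySem.Dict Int Int) (k : Int) :
    PySem.Dict Int Int × PySem.Dict Int Int :=
  if s.1.contains k && decide (0 < s.1.getD k 0) then
    (s.1.insert k (s.1.getD k 0 - 1),
     if s.2.contains k then s.2.insert k (s.2.getD k 0 + 1) else s.2.insert k 1)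
  else s

def solution (X : String) (Y : String) : String :=
  let yCount := Y.toList.foldl (fun d c => aYStep d (pyDigit c)) PySem.Dict.empty
  let st := X.toList.foldl (fun s c => aXStep s (pyDigit c)) (yCount, PySem.Dict.empty)
  if st.2.size ≠ 0 then
    -- answer += str(j) * temp : string repetition ported as replicate+flatten
    let answer := (PySem.List.pyRange 9 (-1) (-1)).foldl
      (fun ans j => if st.2.contains j then
          ans ++ (List.replicate (st.2.getD j 0).toNat (PySem.Int.toChars j)).flatten
        else ans) []
    if PySem.List.pyGet? answer 0 == some '0' then "0" else String.ofList answer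
  else "-1"

-- ===== PORT B =====
-- the while loop with two indices i, j over the sorted lists, as the obvious structural recursion
def bMerge : List Int → List Int → List Int
  | [], _ => []
  | _ :: _, [] => []
  | x :: xs, y :: ys =>
    if x = y then x :: bMerge xs ys
    else if y < x then bMerge xs (y :: ys)
    else bMerge (x :: xs) ys
termination_by a b => a.length + b.length
decreasing_by all_goals (simp [List.length_cons]; try omega)

def solution_alt (X : String) (Y : String) : String :=
  let xs := PySem.List.sorted (X.toList.map pyDigit) (fun n => n) true
  let ys := PySem.List.sorted (Y.toList.map pyDigit) (fun n => n) true
  let common := bMerge xs ys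
  if common = [] then "-1"
  else if PySem.List.pyGet? common 0 == some 0 then "0"
  -- ''.join(map(str, common)) : str of each digit, concatenated
  else String.ofList (common.map PySem.Int.toChars).flatten

-- ===== PRECONDITION & SPEC =====
-- Pre_ excludes exactly the inputs with a non-digit character, on which A (and B) raise ValueError at int(...).
def Pre_solution (X : String) (Y : String) : Prop :=
  ((X.toList ++ Y.toList).all (fun c => ['0','1','2','3','4','5','6','7','8','9'].contains c)) = true
instance (X : String) (Y : String) : Decidable (Pre_solution X Y) := by unfold Pre_solution; infer_instance
def pvWitness_solution : String × String := ("3012", "2103")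

def Spec_solution (X : String) (Y : String) (out : String) : Prop := out = solution_alt X Y
instance (X : String) (Y : String) (out : String) : Decidable (Spec_solution X Y out) := by unfold Spec_solution; infer_instance

-- ===== CLAIM (what is proved, stated in full; the proofs are below) =====
def Claim_equal_solution : Prop := ∀ (X : String) (Y : String), Dom_solution X Y → Pre_solution X Y → Spec_solution X Y (solution X Y)

-- ===== LEMMAS AND PROOFS =====

def digitsL : List Char := ['0','1','2','3','4','5','6','7','8','9']
def digitsZ : List Int := [9, 8, 7, 6, 5, 4, 3, 2, 1, 0]

lemma pyDigit_mem (c : Char) (hc : c ∈ digitsL) : pyDigit c ∈ digitsZ := by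
  fin_cases hc <;> decide

lemma aY_counter (ks : List Int) :
    ks.foldl aYStep PySem.Dict.empty = PySem.Dict.counter ks := by
  have hf : aYStep = fun (d : PySem.Dict Int Int) k => d.insert k (d.getD k 0 + 1) := by
    funext d k
    unfold aYStep
    by_cases h : d.contains k = true
    · simp [h]
    · have h0 : d.getD k 0 = 0 := PySem.Dict.getD_of_not_contains _ _ (by simpa using h)
      simp [h, h0]
  rw [hf, PySem.Dict.foldl_insert_getD_add_one_eq_counter]

lemma consume (ks : List Int) :
    ∀ (yc cnt : PySem.Dict Int Int),
    (∀ k, 0 ≤ yc.getD k 0) → (∀ k, 0 < yc.getD k 0 → yc.contains k = true) →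
    (∀ k, cnt.contains k = decide (0 < cnt.getD k 0)) → (∀ k, 0 ≤ cnt.getD k 0) →
    (∀ k, (ks.foldl aXStep (yc, cnt)).2.getD k 0 = cnt.getD k 0 + min ((ks.count k : Int)) (yc.getD k 0)) ∧
    (∀ k, (ks.foldl aXStep (yc, cnt)).2.contains k = decide (0 < (ks.foldl aXStep (yc, cnt)).2.getD k 0)) := by
  induction ks with
  | nil =>
    intro yc cnt h1 _ h3 _
    refine ⟨fun k => ?_, fun k => by simpa using h3 k⟩
    have := h1 k
    simp [List.foldl]
    omega
  | cons k0 t ih =>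
    intro yc cnt h1 h2 h3 h4
    rw [List.foldl_cons]
    by_cases hc : 0 < yc.getD k0 0
    · have hcon : yc.contains k0 = true := h2 k0 hc
      have hs : aXStep (yc, cnt) k0 =
          (yc.insert k0 (yc.getD k0 0 - 1), cnt.insert k0 (cnt.getD k0 0 + 1)) := by
        unfold aXStep
        by_cases hcc : cnt.contains k0 = true
        · simp [hcon, hc, hcc]
        · have h0 : cnt.getD k0 0 = 0 :=
            PySem.Dict.getD_of_not_contains _ _ (by simpa using hcc)
          simp [hcon, hc, hcc, h0]
      rw [hs]
      have h1' : ∀ k, 0 ≤ (yc.insert k0 (yc.getD k0 0 - 1)).getD k 0 := by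
        intro k
        rw [PySem.Dict.getD_insert]
        split_ifs with h
        · omega
        · exact h1 k
      have h2' : ∀ k, 0 < (yc.insert k0 (yc.getD k0 0 - 1)).getD k 0 →
          (yc.insert k0 (yc.getD k0 0 - 1)).contains k = true := by
        intro k hk
        rw [PySem.Dict.contains_insert]
        by_cases h : k = k0
        · simp [h]
        · rw [PySem.Dict.getD_insert] at hk
          simp [h] at hk ⊢
          exact h2 k hk
      have h3' : ∀ k, (cnt.insert k0 (cnt.getD k0 0 + 1)).contains k =
          decide (0 < (cnt.insert k0 (cnt.getD k0 0 + 1)).getD k 0) := by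
        intro k
        rw [PySem.Dict.contains_insert, PySem.Dict.getD_insert]
        by_cases h : k = k0
        · have := h4 k0
          simp [h]
          omega
        · simp [h, h3 k]
      have h4' : ∀ k, 0 ≤ (cnt.insert k0 (cnt.getD k0 0 + 1)).getD k 0 := by
        intro k
        rw [PySem.Dict.getD_insert]
        split_ifs with h
        · have := h4 k0; omega
        · exact h4 k
      obtain ⟨ihg, ihc⟩ := ih _ _ h1' h2' h3' h4'
      refine ⟨fun k => ?_, ihc⟩
      rw [ihg k, PySem.Dict.getD_insert, PySem.Dict.getD_insert]
      by_cases hk : k = k0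
      · subst hk
        simp [List.count_cons]
        push_cast
        omega
      · have hk' : ¬ k0 = k := fun h => hk h.symm
        simp [hk, hk', List.count_cons]
    · have hg0 : yc.getD k0 0 = 0 := le_antisymm (by omega) (h1 k0)
      have hs : aXStep (yc, cnt) k0 = (yc, cnt) := by
        unfold aXStep; simp [hc]
      rw [hs]
      obtain ⟨ihg, ihc⟩ := ih yc cnt h1 h2 h3 h4
      refine ⟨fun k => ?_, ihc⟩
      rw [ihg k]
      by_cases hk : k = k0
      · subst hk
        rw [hg0]
        simp [List.count_cons]
        omega
      · have hk' : ¬ k0 = k := fun h => hk h.symm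
        simp [hk, hk', List.count_cons]

-- B-side: the two-pointer merge of descending lists picks exactly min of the counts, in order
lemma bMerge_sublist (xs ys : List Int) : List.Sublist (bMerge xs ys) xs := by
  induction xs, ys using bMerge.induct with
  | case1 ys => simp [bMerge]
  | case2 x xs => simp [bMerge]
  | case3 xs y ys ih => rw [bMerge, if_pos rfl]; exact ih.cons₂ y
  | case4 x xs y ys h1 h2 ih =>
    rw [bMerge, if_neg h1, if_pos h2]
    exact ih.trans (List.sublist_cons_self x xs)
  | case5 x xs y ys h1 h2 ih => rw [bMerge, if_neg h1, if_neg h2]; exact ih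

lemma bMerge_count (xs ys : List Int) :
    xs.Pairwise (fun a b => b ≤ a) → ys.Pairwise (fun a b => b ≤ a) →
    ∀ d, (bMerge xs ys).count d = min (xs.count d) (ys.count d) := by
  induction xs, ys using bMerge.induct with
  | case1 ys => intro _ _ d; simp [bMerge]
  | case2 x xs => intro _ _ d; simp [bMerge]
  | case3 xs y ys ih =>
    intro hx hy d
    rw [bMerge, if_pos rfl]
    have := ih (List.pairwise_cons.mp hx).2 (List.pairwise_cons.mp hy).2 d
    by_cases hd : y = d <;> simp [List.count_cons, hd, this] <;> omega
  | case4 x xs y ys h1 h2 ih =>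
    intro hx hy d
    rw [bMerge, if_neg h1, if_pos h2]
    rw [ih (List.pairwise_cons.mp hx).2 hy d]
    by_cases hd : d = x
    · subst hd
      have hnm : d ∉ y :: ys := by
        intro hm
        rcases List.mem_cons.mp hm with h | h
        · exact absurd h.symm (fun he => h1 he.symm)
        · exact absurd ((List.pairwise_cons.mp hy).1 d h) (not_le.mpr h2)
      rw [List.count_eq_zero.mpr hnm]
      simp
    · have hd' : ¬ x = d := fun h => hd h.symm
      simp [List.count_cons, hd']
  | case5 x xs y ys h1 h2 ih =>
    intro hx hy d
    rw [bMerge, if_neg h1, if_neg h2]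
    rw [ih hx (List.pairwise_cons.mp hy).2 d]
    by_cases hd : d = y
    · subst hd
      have hxy : x < d := lt_of_le_of_ne (not_lt.mp h2) h1
      have hnm : d ∉ x :: xs := by
        intro hm
        rcases List.mem_cons.mp hm with h | h
        · exact absurd h (ne_of_gt hxy)
        · have := (List.pairwise_cons.mp hx).1 d h
          exact absurd (lt_of_le_of_lt this hxy) (lt_irrefl d)
      rw [List.count_eq_zero.mpr hnm]
      simp
    · have hd' : ¬ y = d := fun h => hd h.symm
      simp [List.count_cons, hd']

lemma flatMap_rep_pairwise (n : Int → Nat) : ∀ ds : List Int,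
    ds.Pairwise (fun a b => b < a) →
    (ds.flatMap (fun d => List.replicate (n d) d)).Pairwise (fun a b => b ≤ a) := by
  intro ds
  induction ds with
  | nil => intro _; simp
  | cons d t ih =>
    intro h
    rw [List.flatMap_cons]
    obtain ⟨hd, ht⟩ := List.pairwise_cons.mp h
    apply List.pairwise_append.mpr
    refine ⟨List.pairwise_replicate.mpr (Or.inr le_rfl), ih ht, ?_⟩
    intro a ha b hb
    have ha' : a = d := List.eq_of_mem_replicate ha
    obtain ⟨e, het, hbe⟩ := List.mem_flatMap.mp hb
    have hb' : b = e := List.eq_of_mem_replicate hbe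
    rw [ha', hb']
    exact le_of_lt (hd e het)

lemma rep_flatMap_count (n : Int → Nat) (d : Int) :
    (digitsZ.flatMap (fun e => List.replicate (n e) e)).count d
      = if d ∈ digitsZ then n d else 0 := by
  by_cases hd : d ∈ digitsZ
  · rw [if_pos hd]
    fin_cases hd <;> simp [digitsZ, List.count_append, List.count_replicate]
  · rw [if_neg hd]
    rw [List.count_eq_zero]
    intro hm
    obtain ⟨e, het, hbe⟩ := List.mem_flatMap.mp hm
    have : d = e := List.eq_of_mem_replicate hbe
    subst this
    exact hd het

lemma flatten_map_toChars (n : Int → Nat) :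
    ((digitsZ.flatMap (fun j => List.replicate (n j) j)).map PySem.Int.toChars).flatten
      = digitsZ.flatMap (fun j => (List.replicate (n j) (PySem.Int.toChars j)).flatten) := by
  simp [digitsZ, List.map_replicate]

-- ===== VERDICT (by name: the statement is the Claim_ definition above) =====
theorem solution_spec : Claim_equal_solution := by
  intro X Y _ hpre
  unfold Spec_solution
  have hpre' : ∀ c ∈ X.toList ++ Y.toList, c ∈ digitsL := by
    intro c hc
    have := List.all_eq_true.1 hpre c hc
    simpa [digitsL] using this
  have hX : ∀ c ∈ X.toList, c ∈ digitsL := fun c hc => hpre' c (List.mem_append.2 (Or.inl hc))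
  have hY : ∀ c ∈ Y.toList, c ∈ digitsL := fun c hc => hpre' c (List.mem_append.2 (Or.inr hc))
  simp only [solution, solution_alt]
  rw [show Y.toList.foldl (fun d c => aYStep d (pyDigit c)) PySem.Dict.empty
        = PySem.Dict.counter (Y.toList.map pyDigit) from by rw [← List.foldl_map, aY_counter]]
  rw [show X.toList.foldl (fun s c => aXStep s (pyDigit c))
        (PySem.Dict.counter (Y.toList.map pyDigit), PySem.Dict.empty)
        = (X.toList.map pyDigit).foldl aXStep
            (PySem.Dict.counter (Y.toList.map pyDigit), PySem.Dict.empty) from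
      (List.foldl_map).symm]
  set Xm := X.toList.map pyDigit with hXm
  set Ym := Y.toList.map pyDigit with hYm
  have hXmD : ∀ k ∈ Xm, k ∈ digitsZ := by
    intro k hk
    obtain ⟨c, hcX, hck⟩ := List.mem_map.1 hk
    exact hck ▸ pyDigit_mem c (hX c hcX)
  set st2 := (Xm.foldl aXStep (PySem.Dict.counter Ym, PySem.Dict.empty)).2 with hst2
  -- characterisation of A's `count` dict
  obtain ⟨hg, hcnt⟩ := consume Xm (PySem.Dict.counter Ym) PySem.Dict.empty
    (fun k => by rw [PySem.Dict.getD_counter]; positivity)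
    (fun k hk => by
      rw [PySem.Dict.getD_counter] at hk
      rw [PySem.Dict.contains_counter]
      have : k ∈ Ym := List.count_pos_iff.1 (by exact_mod_cast hk)
      simpa using this)
    (fun k => by simp [PySem.Dict.contains_empty, PySem.Dict.getD_empty])
    (fun k => by simp [PySem.Dict.getD_empty])
  have hval : ∀ k, st2.getD k 0 = ((min (Xm.count k) (Ym.count k) : Nat) : Int) := by
    intro k
    rw [hst2, hg k, PySem.Dict.getD_empty, PySem.Dict.getD_counter]
    push_cast
    ring
  have hcon : ∀ k, st2.contains k = decide (0 < min (Xm.count k) (Ym.count k)) := by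
    intro k
    rw [hst2, hcnt k, ← hst2, hval k]
    exact decide_eq_decide.2 (by exact_mod_cast Iff.rfl)
  -- the assembled answer of A is the descending flatMap of per-digit minima
  rw [show PySem.List.pyRange 9 (-1) (-1) = digitsZ from by decide]
  have hfun : ∀ (ans : List Char), ∀ j ∈ digitsZ,
      (if st2.contains j then
          ans ++ (List.replicate (st2.getD j 0).toNat (PySem.Int.toChars j)).flatten
        else ans)
      = ans ++ (List.replicate (min (Xm.count j) (Ym.count j)) (PySem.Int.toChars j)).flatten := by
    intro ans j _
    rw [hcon, hval]
    by_cases h : 0 < min (Xm.count j) (Ym.count j)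
    · rw [if_pos (by simpa using h), Int.toNat_natCast]
    · have h0 : min (Xm.count j) (Ym.count j) = 0 := by omega
      simp [h0]
  rw [PySem.List.foldl_congr_mem digitsZ _ _ [] hfun]
  rw [show digitsZ.foldl
        (fun ans j => ans ++ (List.replicate (min (Xm.count j) (Ym.count j)) (PySem.Int.toChars j)).flatten) []
      = digitsZ.flatMap (fun j => (List.replicate (min (Xm.count j) (Ym.count j)) (PySem.Int.toChars j)).flatten)
    from by rw [PySem.List.foldl_append_eq_flatMap]; simp]
  -- B's merge of the two descending sorts is the flatMap of per-digit minima
  set xs := PySem.List.sorted Xm (fun n => n) true with hxs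
  set ys := PySem.List.sorted Ym (fun n => n) true with hys
  set Rz := digitsZ.flatMap (fun j => List.replicate (min (Xm.count j) (Ym.count j)) j) with hRz
  have hxp : xs.Pairwise (fun a b => b ≤ a) := PySem.List.sorted_pairwise_rev Xm (fun n => n)
  have hyp : ys.Pairwise (fun a b => b ≤ a) := PySem.List.sorted_pairwise_rev Ym (fun n => n)
  have hxc : ∀ d, xs.count d = Xm.count d :=
    fun d => (PySem.List.sorted_perm Xm (fun n => n) true).count_eq d
  have hyc : ∀ d, ys.count d = Ym.count d :=
    fun d => (PySem.List.sorted_perm Ym (fun n => n) true).count_eq d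
  have hMR : bMerge xs ys = Rz := by
    have hcount : ∀ d, (bMerge xs ys).count d = Rz.count d := by
      intro d
      rw [bMerge_count xs ys hxp hyp d, hxc d, hyc d, hRz,
        rep_flatMap_count (fun e => min (Xm.count e) (Ym.count e)) d]
      by_cases hd : d ∈ digitsZ
      · rw [if_pos hd]
      · rw [if_neg hd]
        have : d ∉ Xm := fun hm => hd (hXmD d hm)
        rw [List.count_eq_zero.mpr this]
        simp
    have hperm : (bMerge xs ys).Perm Rz := List.perm_iff_count.mpr hcount
    have hsM : (bMerge xs ys).Pairwise (fun a b => b ≤ a) :=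
      hxp.sublist (bMerge_sublist xs ys)
    have hsR : Rz.Pairwise (fun a b => b ≤ a) :=
      flatMap_rep_pairwise _ digitsZ (by decide)
    exact List.Perm.eq_of_pairwise (fun a b _ _ h1 h2 => le_antisymm h2 h1) hsM hsR hperm
  rw [hMR]
  -- membership of Rz's elements among the digits 0..9
  have hRmem : ∀ r ∈ Rz, r ∈ digitsZ := by
    intro r hr
    obtain ⟨e, het, hre⟩ := List.mem_flatMap.mp hr
    exact (List.eq_of_mem_replicate hre) ▸ het
  -- the two emptiness tests agree
  have hRiff : Rz = [] ↔ ∀ j ∈ digitsZ, min (Xm.count j) (Ym.count j) = 0 := by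
    rw [hRz]
    simp only [digitsZ, List.flatMap_cons, List.flatMap_nil, List.append_nil,
      List.append_eq_nil_iff, List.replicate_eq_nil_iff]
    constructor
    · rintro ⟨h9, h8, h7, h6, h5, h4, h3, h2, h1, h0⟩
      intro j hj
      fin_cases hj <;> assumption
    · intro h
      refine ⟨?_, ?_, ?_, ?_, ?_, ?_, ?_, ?_, ?_, ?_⟩ <;> exact h _ (by decide)
  have hsz : st2.size = 0 ↔ Rz = [] := by
    constructor
    · intro h
      have hkeys : st2.keys = [] := by
        have : st2.items = [] := List.length_eq_zero_iff.1 h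
        simp [PySem.Dict.keys, this]
      rw [hRiff]
      intro j _
      have hcf : st2.contains j = false := by
        by_contra hcc
        have : j ∈ st2.keys := (PySem.Dict.contains_iff_mem_keys _ _).1 (by simpa using hcc)
        simp [hkeys] at this
      rw [hcon] at hcf
      have : ¬ 0 < min (Xm.count j) (Ym.count j) := by simpa using hcf
      omega
    · intro h
      rw [hRiff] at h
      have hall : ∀ k, st2.contains k = false := by
        intro k
        rw [hcon]
        by_contra hcc
        have hk : 0 < min (Xm.count k) (Ym.count k) := by simpa using hcc
        have hxk : k ∈ Xm := List.count_pos_iff.1 (by omega)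
        have h0 := h k (hXmD k hxk)
        omega
      have hkeys : st2.keys = [] := by
        rw [List.eq_nil_iff_forall_not_mem]
        intro k hk
        have := (PySem.Dict.contains_iff_mem_keys st2 k).2 hk
        rw [hall k] at this
        exact Bool.false_ne_true this
      have : st2.items = [] := by
        have := congrArg List.length hkeys
        simpa [PySem.Dict.keys] using List.length_eq_zero_iff.1 this
      simp [PySem.Dict.size, this]
  -- A's answer list is exactly B's join of the merged digits
  have hAz : digitsZ.flatMap (fun j => (List.replicate (min (Xm.count j) (Ym.count j)) (PySem.Int.toChars j)).flatten)
      = (Rz.map PySem.Int.toChars).flatten := by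
    rw [hRz, flatten_map_toChars]
  rw [hAz]
  by_cases hRe : Rz = []
  · have h0 : st2.size = 0 := hsz.2 hRe
    rw [if_neg (not_not_intro h0), if_pos hRe]
  · have h0 : st2.size ≠ 0 := fun h => hRe (hsz.1 h)
    rw [if_pos h0, if_neg hRe]
    -- heads agree: the first merged digit is 0 iff A's first answer character is '0'
    obtain ⟨r0, rest, hcons⟩ := List.exists_cons_of_ne_nil hRe
    have hr0 : r0 ∈ digitsZ := hRmem r0 (hcons ▸ List.mem_cons_self)
    obtain ⟨c, hc1, hc2⟩ : ∃ c, PySem.Int.toChars r0 = [c] ∧ ((c = '0') ↔ (r0 = 0)) := by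
      fin_cases hr0 <;>
        first
        | exact ⟨'9', by decide, by decide⟩
        | exact ⟨'8', by decide, by decide⟩
        | exact ⟨'7', by decide, by decide⟩
        | exact ⟨'6', by decide, by decide⟩
        | exact ⟨'5', by decide, by decide⟩
        | exact ⟨'4', by decide, by decide⟩
        | exact ⟨'3', by decide, by decide⟩
        | exact ⟨'2', by decide, by decide⟩
        | exact ⟨'1', by decide, by decide⟩
        | exact ⟨'0', by decide, by decide⟩
    rw [hcons, List.map_cons, List.flatten_cons, hc1, List.singleton_append,
      PySem.List.pyGet?_zero_cons, PySem.List.pyGet?_zero_cons]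
    by_cases h0 : r0 = 0
    · have hcc : c = '0' := hc2.mpr h0
      simp [hcc, h0]
    · have hc0 : ¬ c = '0' := fun h => h0 (hc2.mp h)
      simp [h0, hc0]
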